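-- pv_equiv track=rewrite | github.com/flaviussteff/LFA-Labs | PDA/PDA.py | pda_sim
-- ===== SOURCE A (Python) =====
-- def pda_sim(state, pos, stack, word, accept, transitions):
--     """ simuleaza functionarea pda-ului """
--     # daca am ajuns la sfarsitul cuvantului
--     if pos == len(word):
--         # accepta doar daca suntem in starea finala si stiva este goala
--         return state == accept and not stack
--
--     # simbolul curent din cuvant
--     symbol = word[pos] if pos < len(word) else 'ε'
--     # varful stivei
--     top = stack[-1] if stack else None
--
--     # verifica daca exista o tranzitie valida
--     if (state, symbol, top) in transitions:
--         for next_state, push in transitions[(state, symbol, top)]: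
--             # pregateste o noua stiva: scoate varful daca era unul
--             new_stack = stack[:-1] if top else stack[:]
--             # daca trebuie sa punem ceva pe stiva
--             if push != 'ε':
--                 new_stack.extend(push)
--             # apeleaza recursiv pda-ul pentru starea urmatoare
--             if pda_sim(next_state, pos + 1, new_stack, word, accept, transitions):
--                 return True
--     return False
-- ===== SOURCE B (Python) =====
-- def _succs(transitions, symbol, st, stk):
--     """All configurations reachable from (st, stk) in one step reading symbol."""
--     top = stk[-1] if stk else None
--     if (st, symbol, top) not in transitions:
--         return []
--     out = []
--     for ns, push in transitions[(st, symbol, top)]: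
--         base = stk[:-1] if top else stk
--         if push != 'ε':
--             base = base + tuple(push)
--         out.append((ns, base))
--     return out
--
--
-- def _step(transitions, configs, symbol):
--     """One level of the subset simulation: the deduplicated successor set."""
--     nxt = set()
--     for c in configs:
--         for c2 in _succs(transitions, symbol, *c):
--             nxt.add(c2)
--     return nxt
--
--
-- def pda_sim(state, pos, stack, word, accept, transitions):
--     """Level-by-level deduplicated subset simulation of the nondeterministic PDA."""
--     n = len(word)
--     if pos >= n:
--         # past the end no input symbol remains: accept iff exactly at the end,
--         # in the accept state, with an empty stack
--         return pos == n and state == accept and not stack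
--     configs = {(state, tuple(stack))}
--     for i in range(pos, n):
--         configs = _step(transitions, configs, word[i])
--     return any(st == accept and not stk for st, stk in configs)
-- ===== Notes on version B (the rewrite author's own statement) =====
-- stated objective: alternative
-- what changed: Replaces the branching backtracking recursion by a level-by-level subset simulation that keeps one deduplicated set of reachable (state, stack) configurations per input position.
import Mathlib
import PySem

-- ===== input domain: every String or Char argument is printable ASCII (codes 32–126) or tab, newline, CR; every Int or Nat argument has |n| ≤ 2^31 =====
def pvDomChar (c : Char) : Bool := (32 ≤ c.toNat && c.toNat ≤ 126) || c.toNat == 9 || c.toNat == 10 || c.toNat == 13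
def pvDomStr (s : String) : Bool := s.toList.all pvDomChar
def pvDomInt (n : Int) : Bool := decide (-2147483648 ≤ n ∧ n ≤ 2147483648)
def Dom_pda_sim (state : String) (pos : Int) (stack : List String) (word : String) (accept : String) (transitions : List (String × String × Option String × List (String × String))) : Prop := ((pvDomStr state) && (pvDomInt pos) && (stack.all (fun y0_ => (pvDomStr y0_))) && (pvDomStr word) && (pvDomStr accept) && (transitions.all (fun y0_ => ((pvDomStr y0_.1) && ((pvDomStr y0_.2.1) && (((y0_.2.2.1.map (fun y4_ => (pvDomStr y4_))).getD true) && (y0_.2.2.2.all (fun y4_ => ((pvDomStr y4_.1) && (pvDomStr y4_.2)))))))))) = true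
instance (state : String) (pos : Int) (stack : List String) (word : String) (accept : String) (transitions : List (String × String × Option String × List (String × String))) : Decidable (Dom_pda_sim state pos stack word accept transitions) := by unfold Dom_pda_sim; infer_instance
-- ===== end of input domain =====

-- B replaces A's backtracking recursion by a level-by-level deduplicated subset
-- simulation over reachable (state, stack) configurations (objective: alternative).


-- ===== PORT A =====
-- fuel-guarded transliteration of A's recursion; fuel ((len word - pos).toNat + 1)
-- covers the real recursion depth wherever Python A terminates inside Pre_
def pdaGo (word accept : String) (transitions : List (String × String × Option String × List (String × String))) : Nat → String → Int → List String → Bool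
  | 0, _, _, _ => false
  | fuel + 1, state, pos, stack =>
    if pos = (PySem.Str.len word) then
      decide (state = accept) && stack.isEmpty
    else
      -- symbol = word[pos] if pos < len(word) else 'ε'   (none = IndexError)
      let symbol? : Option String :=
        if pos < (PySem.Str.len word) then
          (PySem.Str.pyGet? word pos).map (fun c => String.singleton c)
        else some "ε"
      match symbol? with
      | none => false
      | some symbol =>
        let top : Option String := stack.getLast?
        -- if (state, symbol, top) in transitions: for ... early-return True = List.any
        match transitions.find? (fun t => decide ((t.1, t.2.1, t.2.2.1) = (state, symbol, top))) with
        | none => false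
        | some t =>
          t.2.2.2.any (fun pr =>
            let new_stack := if (match top with | some s => decide (s ≠ "") | none => false) then stack.dropLast else stack
            let new_stack := if pr.2 ≠ "ε" then new_stack ++ pr.2.toList.map (fun ch => String.singleton ch) else new_stack
            pdaGo word accept transitions fuel pr.1 (pos + 1) new_stack)

def pda_sim (state : String) (pos : Int) (stack : List String) (word : String) (accept : String) (transitions : List (String × String × Option String × List (String × String))) : Bool :=
  pdaGo word accept transitions (((PySem.Str.len word) - pos).toNat + 1) state pos stack

-- ===== PORT B =====
-- _succs: all configurations reachable from (st, stk) in one step reading symbol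
def pdaSuccs (transitions : List (String × String × Option String × List (String × String))) (symbol : String) (st : String) (stk : List String) : List (String × List String) :=
  let top : Option String := stk.getLast?
  match transitions.find? (fun t => decide ((t.1, t.2.1, t.2.2.1) = (st, symbol, top))) with
  | none => []
  | some t =>
    t.2.2.2.map (fun pr =>
      let base := if (match top with | some s => decide (s ≠ "") | none => false) then stk.dropLast else stk
      (pr.1, if pr.2 ≠ "ε" then base ++ pr.2.toList.map (fun ch => String.singleton ch) else base))

-- _step: one level of the subset simulation, a deduplicated successor set
def pdaStep (transitions : List (String × String × Option String × List (String × String))) (configs : PySem.Set (String × List String)) (symbol : String) : PySem.Set (String × List String) :=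
  configs.foldl (fun nxt c => (pdaSuccs transitions symbol c.1 c.2).foldl (fun s x => PySem.Set.add s x) nxt) PySem.Set.empty

def pda_sim_alt (state : String) (pos : Int) (stack : List String) (word : String) (accept : String) (transitions : List (String × String × Option String × List (String × String))) : Bool :=
  let n : Int := (PySem.Str.len word)
  if pos ≥ n then
    decide (pos = n) && (decide (state = accept) && stack.isEmpty)
  else
    let final := (PySem.List.pyRange pos n 1).foldl
      (fun configs i =>
        match PySem.Str.pyGet? word i with
        | none => PySem.Set.empty   -- word[i]: IndexError, outside Pre_
        | some c => pdaStep transitions configs (String.singleton c))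
      (PySem.Set.ofList [(state, stack)])
    final.any (fun c => decide (c.1 = accept) && c.2.isEmpty)

-- ===== PRECONDITION & SPEC =====
-- Pre_ excludes exactly pos < -len(word), where A (and B alike) raises IndexError on word[pos].
def Pre_pda_sim (state : String) (pos : Int) (stack : List String) (word : String) (accept : String) (transitions : List (String × String × Option String × List (String × String))) : Prop :=
  -(PySem.Str.len word) ≤ pos
instance (state : String) (pos : Int) (stack : List String) (word : String) (accept : String) (transitions : List (String × String × Option String × List (String × String))) : Decidable (Pre_pda_sim state pos stack word accept transitions) := by unfold Pre_pda_sim; infer_instance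
def pvWitness_pda_sim : String × Int × List String × String × String × (List (String × String × Option String × List (String × String))) :=
  ("q0", 0, ["Z"], "ab", "q1", [("q0", "a", some "Z", [("q0", "Z")]), ("q0", "b", some "Z", [("q1", "")])])
def Spec_pda_sim (state : String) (pos : Int) (stack : List String) (word : String) (accept : String) (transitions : List (String × String × Option String × List (String × String))) (out : Bool) : Prop := out = pda_sim_alt state pos stack word accept transitions
instance (state : String) (pos : Int) (stack : List String) (word : String) (accept : String) (transitions : List (String × String × Option String × List (String × String))) (out : Bool) : Decidable (Spec_pda_sim state pos stack word accept transitions out) := by unfold Spec_pda_sim; infer_instance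

-- ===== CLAIM (what is proved, stated in full; the proofs are below) =====
def Claim_equal_pda_sim : Prop := ∀ (state : String) (pos : Int) (stack : List String) (word : String) (accept : String) (transitions : List (String × String × Option String × List (String × String))), Dom_pda_sim state pos stack word accept transitions → Pre_pda_sim state pos stack word accept transitions → Spec_pda_sim state pos stack word accept transitions (pda_sim state pos stack word accept transitions)

-- ===== LEMMAS AND PROOFS =====

theorem any_set_add {α : Type} [BEq α] [LawfulBEq α] (s : PySem.Set α) (x : α) (p : α → Bool) :
    (PySem.Set.add s x).any p = (s.any p || p x) := by
  rw [PySem.Set.add_eq_ite]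
  by_cases hx : x ∈ s
  · simp only [if_pos hx]
    cases hpx : p x
    · simp
    · have hs : s.any p = true := List.any_eq_true.mpr ⟨x, hx, hpx⟩
      simp [hs]
  · simp [if_neg hx]

theorem any_foldl_add {α : Type} [BEq α] [LawfulBEq α] (l : List α) (s : PySem.Set α) (p : α → Bool) :
    (l.foldl (fun s x => PySem.Set.add s x) s).any p = (s.any p || l.any p) := by
  induction l generalizing s with
  | nil => simp
  | cons x xs ih => simp [ih, any_set_add, Bool.or_assoc]

theorem any_foldl_succs {α : Type} [BEq α] [LawfulBEq α] (l : List α) (f : α → List α) (s : PySem.Set α) (p : α → Bool) :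
    (l.foldl (fun nxt c => (f c).foldl (fun s x => PySem.Set.add s x) nxt) s).any p
      = (s.any p || l.any (fun c => (f c).any p)) := by
  induction l generalizing s with
  | nil => simp
  | cons x xs ih => simp [ih, any_foldl_add, Bool.or_assoc]

theorem pdaGo_step (word accept : String) (transitions : List (String × String × Option String × List (String × String)))
    (fuel : Nat) (st : String) (pos : Int) (stk : List String) (c : Char)
    (hne : pos ≠ (PySem.Str.len word))
    (hlt : pos < (PySem.Str.len word))
    (hget : PySem.Str.pyGet? word pos = some c) :
    pdaGo word accept transitions (fuel + 1) st pos stk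
      = (pdaSuccs transitions (String.singleton c) st stk).any
          (fun c' => pdaGo word accept transitions fuel c'.1 (pos + 1) c'.2) := by
  rw [pdaGo]
  simp only [if_neg hne, if_pos hlt, hget, Option.map_some, pdaSuccs]
  cases transitions.find? (fun t => decide ((t.1, t.2.1, t.2.2.1) = (st, String.singleton c, stk.getLast?))) with
  | none => rfl
  | some t => rw [List.any_map]; rfl

theorem pyGet?_isSome_of_range (word : String) (pos : Int)
    (hge : -(PySem.Str.len word) ≤ pos)
    (hlt : pos < (PySem.Str.len word)) :
    ∃ c, PySem.Str.pyGet? word pos = some c := by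
  cases hc : PySem.Str.pyGet? word pos with
  | some c => exact Exists.intro c rfl
  | none =>
    exfalso
    have : ¬ PySem.Raise.InRange word.toList.length pos := by
      have := hc
      simp only [PySem.Str.pyGet?] at this
      simpa [PySem.List.pyGet?_eq_none_iff] using this
    apply this
    have hlen : PySem.Str.len word = (word.toList.length : Int) := by
      simp [PySem.Str.len_eq]
    unfold PySem.Raise.InRange
    omega

-- main level-by-level invariant: the BFS fold from position pos equals
-- "some configuration in the set is accepted by A's recursion"
theorem bfs_level (word accept : String) (transitions : List (String × String × Option String × List (String × String))) :
    ∀ (k : Nat) (pos : Int), pos ≤ (PySem.Str.len word) →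
      -(PySem.Str.len word) ≤ pos →
      ((PySem.Str.len word) - pos).toNat = k →
      ∀ (configs : PySem.Set (String × List String)),
      ((PySem.List.pyRange pos (PySem.Str.len word) 1).foldl
          (fun configs i =>
            match PySem.Str.pyGet? word i with
            | none => PySem.Set.empty
            | some c => pdaStep transitions configs (String.singleton c))
          configs).any (fun c => decide (c.1 = accept) && c.2.isEmpty)
        = configs.any (fun c => pdaGo word accept transitions (k + 1) c.1 pos c.2) := by
  intro k
  induction k with
  | zero =>
    intro pos hle hge hk configs
    have hpos : pos = (PySem.Str.len word) := by omega
    rw [PySem.List.pyRange_one_eq_nil (by omega)]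
    simp only [List.foldl_nil]
    refine List.any_congr rfl (fun c => ?_)
    rw [pdaGo]
    simp [hpos]
  | succ k ih =>
    intro pos hle hge hk configs
    have hlt : pos < (PySem.Str.len word) := by omega
    rw [PySem.List.pyRange_one_cons hlt]
    simp only [List.foldl_cons]
    obtain ⟨c, hc⟩ := pyGet?_isSome_of_range word pos hge hlt
    rw [hc]
    rw [ih (pos + 1) (by omega) (by omega) (by omega)]
    unfold pdaStep
    rw [any_foldl_succs]
    simp only [PySem.Set.empty, List.any_nil, Bool.false_or]
    refine List.any_congr rfl (fun cfg => ?_)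
    exact (pdaGo_step word accept transitions (k + 1) cfg.1 pos cfg.2 c (by omega) hlt hc).symm

-- inside Dom no transition key carries the pseudo-symbol 'ε' (non-ASCII), so A's
-- lookup past the end of the word always fails
theorem find_eps_none (transitions : List (String × String × Option String × List (String × String)))
    (hdom : transitions.all (fun y0_ => ((pvDomStr y0_.1) && ((pvDomStr y0_.2.1) && (((y0_.2.2.1.map (fun y4_ => (pvDomStr y4_))).getD true) && (y0_.2.2.2.all (fun y4_ => ((pvDomStr y4_.1) && (pvDomStr y4_.2)))))))) = true)
    (st : String) (top : Option String) :
    transitions.find? (fun t => decide ((t.1, t.2.1, t.2.2.1) = (st, "ε", top))) = none := by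
  rw [List.find?_eq_none]
  intro t ht
  simp only [decide_eq_true_eq]
  intro heq
  have h2 : t.2.1 = "ε" := by
    have := congrArg (fun p => p.2.1) heq
    simpa using this
  have := List.all_eq_true.mp hdom t ht
  rw [h2] at this
  simp [pvDomStr, pvDomChar] at this

theorem pda_sim_eq_alt (state : String) (pos : Int) (stack : List String) (word : String) (accept : String)
    (transitions : List (String × String × Option String × List (String × String)))
    (hdom : Dom_pda_sim state pos stack word accept transitions)
    (hpre : Pre_pda_sim state pos stack word accept transitions) :
    pda_sim state pos stack word accept transitions = pda_sim_alt state pos stack word accept transitions := by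
  unfold Pre_pda_sim at hpre
  unfold pda_sim pda_sim_alt
  by_cases hge : pos ≥ (PySem.Str.len word)
  · rw [if_pos hge]
    by_cases heq : pos = (PySem.Str.len word)
    · have : ((PySem.Str.len word) - pos).toNat = 0 := by omega
      rw [this, pdaGo]
      simp [heq]
    · -- pos > len: A looks up the pseudo-symbol 'ε', which never matches inside Dom
      have : ((PySem.Str.len word) - pos).toNat = 0 := by omega
      rw [this, pdaGo]
      rw [if_neg heq]
      simp only [if_neg (by omega : ¬ pos < (PySem.Str.len word))]
      have hT : transitions.all (fun y0_ => ((pvDomStr y0_.1) && ((pvDomStr y0_.2.1) && (((y0_.2.2.1.map (fun y4_ => (pvDomStr y4_))).getD true) && (y0_.2.2.2.all (fun y4_ => ((pvDomStr y4_.1) && (pvDomStr y4_.2)))))))) = true := by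
        unfold Dom_pda_sim at hdom
        simp only [Bool.and_eq_true] at hdom
        exact hdom.2
      rw [find_eps_none transitions hT state stack.getLast?]
      simp only [PySem.Str.len_eq] at heq
      simp
      intro h
      exact absurd (by simpa using h) heq
  · rw [if_neg hge]
    rw [bfs_level word accept transitions (((PySem.Str.len word) - pos).toNat) pos (by omega) hpre rfl]
    have hsingle : PySem.Set.ofList [(state, stack)] = [(state, stack)] := rfl
    rw [hsingle]
    simp

-- ===== VERDICT (by name: the statement is the Claim_ definition above) =====
theorem pda_sim_spec : Claim_equal_pda_sim := by
  intro state pos stack word accept transitions hdom hpre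
  unfold Spec_pda_sim
  exact pda_sim_eq_alt state pos stack word accept transitions hdom hpre
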